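-- pv_equiv track=rewrite | github.com/Will-Sin/ground-oracle-test | my_awesome_api/utils.py | complete_paragraph
-- ===== SOURCE A (Python) =====
-- def complete_paragraph(string):
--     """
--     This function is an aid for the response received from the OpenAI API call. Sometimes with our models the response
--     does not end with a punctuation mark, this function will check to see if it does, and if it doesn't, it will
--     add an ending punctuation.
--
--     :param string: (string)
--     :return string: (string)
--     """
--
--     sentence_endings = {'.', '!', '?'}
--
--     # Remove trailing whitespace
--     string = string.strip()
--
--     # Check if the string ends with sentence-ending punctuation
--     if string[-1] not in sentence_endings:
--         # Find the last occurrence of sentence-ending punctuation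
--         last_punctuation_index = max(string.rfind(p) for p in sentence_endings)
--
--         # Remove the unfinished sentence if found
--         if last_punctuation_index != -1:
--             string = string[:last_punctuation_index + 1]
--         else:
--             # If no sentence-ending punctuation is found, add a period at the end
--             string += '.'
--
--     return string
-- ===== SOURCE B (Python) =====
-- def complete_paragraph(string):
--     # Single backward scan for the last sentence-ending punctuation,
--     # instead of three independent rfind passes.
--     s = string.strip()
--     i = len(s) - 1
--     while i >= 0 and s[i] not in '.!?':
--         i -= 1
--     if i < 0:
--         return s + '.'
--     return s[:i + 1]
-- ===== Notes on version B (the rewrite author's own statement) =====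
-- stated objective: alternative
-- what changed: Replaces the guard-plus-max-of-three-rfind-scans with a single backward scan that finds the last sentence-ending punctuation once; the truncate/append decision falls out of that one index and the separate ends-with guard disappears.
import Mathlib
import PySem

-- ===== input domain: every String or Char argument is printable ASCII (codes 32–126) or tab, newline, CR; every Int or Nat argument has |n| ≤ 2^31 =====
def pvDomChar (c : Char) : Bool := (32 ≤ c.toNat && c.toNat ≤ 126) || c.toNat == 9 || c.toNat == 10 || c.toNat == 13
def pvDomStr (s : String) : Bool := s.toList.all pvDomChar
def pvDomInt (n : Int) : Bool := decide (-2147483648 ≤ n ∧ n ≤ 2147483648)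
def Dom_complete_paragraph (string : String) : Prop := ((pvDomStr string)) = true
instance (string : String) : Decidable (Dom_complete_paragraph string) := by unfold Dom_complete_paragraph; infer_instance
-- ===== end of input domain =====

-- B replaces the ends-with guard plus three independent rfind scans by a single
-- backward scan for the last sentence-ending punctuation (alternative decomposition,
-- same asymptotic cost).

-- ===== PORT A =====
def complete_paragraph (string : String) : String :=
  -- string = string.strip()
  let s := PySem.Str.strip string
  -- string[-1]  (IndexError when s is empty: excluded by Pre_)
  match PySem.Str.pyGet? s (-1) with
  | none => s
  | some c =>
    -- if string[-1] not in sentence_endings: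
    if !(c == '.' || c == '!' || c == '?') then
      -- max(string.rfind(p) for p in sentence_endings)  (max is order-independent)
      let lpi := max (max (PySem.Str.rfind s ".") (PySem.Str.rfind s "!"))
                     (PySem.Str.rfind s "?")
      if lpi ≠ -1 then PySem.Str.slice s none (some (lpi + 1)) else s ++ "."
    else s

-- ===== PORT B =====
-- s[i] in '.!?'
def pvEndB (c : Char) : Bool := c == '.' || c == '!' || c == '?'

-- the while loop: i runs down from len(s)-1; scanning the reversed list, a hit at
-- head position corresponds to index rest.length in the original list
def pvScanB : List Char → Int
  | [] => -1
  | c :: rest => if pvEndB c then (rest.length : Int) else pvScanB rest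

def complete_paragraph_alt (string : String) : String :=
  let s := (PySem.Str.strip string).toList
  let i := pvScanB s.reverse
  if i < 0 then String.ofList (s ++ ['.'])
  else String.ofList (PySem.List.slice s none (some (i + 1)))

-- ===== PRECONDITION & SPEC =====
-- Pre_ excludes exactly the inputs whose strip() is empty, where A raises IndexError (B returns "." there).
def Pre_complete_paragraph (string : String) : Prop := PySem.Str.strip string ≠ ""
instance (string : String) : Decidable (Pre_complete_paragraph string) := by
  unfold Pre_complete_paragraph; infer_instance

def pvWitness_complete_paragraph : String := "hi. there"

def Spec_complete_paragraph (string : String) (out : String) : Prop :=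
  out = complete_paragraph_alt string
instance (string : String) (out : String) : Decidable (Spec_complete_paragraph string out) := by
  unfold Spec_complete_paragraph; infer_instance

-- ===== CLAIM (what is proved, stated in full; the proofs are below) =====
def Claim_equal_complete_paragraph : Prop :=
  ∀ (string : String), Dom_complete_paragraph string → Pre_complete_paragraph string →
    Spec_complete_paragraph string (complete_paragraph string)

-- ===== LEMMAS AND PROOFS =====

-- countdown form of a "last index where the check fires" search, the common spec
-- of A's rfind-based max and B's reverse scan
def pvGoP (p : Char → Bool) (s : List Char) : Nat → Int
  | 0 => if (s[0]?.map p).getD false then 0 else -1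
  | (j+1) => if (s[(j+1)]?.map p).getD false then ((j : Int) + 1) else pvGoP p s j

theorem pvGoP_congr (p q : Char → Bool) (h : ∀ c, p c = q c) (s : List Char) (n : Nat) :
    pvGoP p s n = pvGoP q s n := by
  induction n with
  | zero => simp only [pvGoP]; cases s[0]? with
    | none => rfl
    | some c => simp [h]
  | succ j ih =>
    simp only [pvGoP, ih]
    cases s[(j+1)]? with
    | none => rfl
    | some c => simp [h]

theorem pvGoP_le (p : Char → Bool) (s : List Char) (n : Nat) : pvGoP p s n ≤ n := by
  induction n with
  | zero => simp only [pvGoP]; split <;> omega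
  | succ j ih => simp only [pvGoP]; split <;> omega

theorem pvGoP_ge (p : Char → Bool) (s : List Char) (n : Nat) : -1 ≤ pvGoP p s n := by
  induction n with
  | zero => simp only [pvGoP]; split <;> omega
  | succ j ih => simp only [pvGoP]; split <;> omega

-- rfind.go with a singleton pattern is pvGoP with equality check
theorem pv_isPrefixOf_singleton (c : Char) (t : List Char) :
    [c].isPrefixOf t = ((t.head?.map (fun d => c == d)).getD false) := by
  cases t <;> simp [List.isPrefixOf]

theorem pv_rfind_go_eq (c : Char) (s : List Char) (n : Nat) :
    PySem.Chars.rfind.go s [c] n = pvGoP (fun d => c == d) s n := by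
  induction n with
  | zero =>
    simp only [PySem.Chars.rfind.go, pvGoP, pv_isPrefixOf_singleton]
    rw [show s.head? = s[0]? from List.head?_eq_getElem?]
  | succ j ih =>
    simp only [PySem.Chars.rfind.go, pvGoP, pv_isPrefixOf_singleton, ih]
    rw [List.head?_drop]
    norm_cast

-- max of three countdown searches = one countdown search with the union check
theorem pv_max3 (p1 p2 p3 : Char → Bool) (s : List Char) (n : Nat) :
    max (max (pvGoP p1 s n) (pvGoP p2 s n)) (pvGoP p3 s n)
      = pvGoP (fun c => p1 c || p2 c || p3 c) s n := by
  induction n with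
  | zero =>
    simp only [pvGoP]
    cases h : s[0]? with
    | none => simp
    | some c =>
      simp only [Option.map_some, Option.getD_some]
      by_cases h1 : p1 c <;> by_cases h2 : p2 c <;> by_cases h3 : p3 c <;>
        simp [h1, h2, h3]
  | succ j ih =>
    have b1 := pvGoP_le p1 s j
    have b2 := pvGoP_le p2 s j
    have b3 := pvGoP_le p3 s j
    simp only [pvGoP]
    cases h : s[(j+1)]? with
    | none => simpa using ih
    | some c =>
      simp only [Option.map_some, Option.getD_some]
      by_cases h1 : p1 c <;> by_cases h2 : p2 c <;> by_cases h3 : p3 c <;>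
        simp [h1, h2, h3, ih] <;> omega

theorem pvGoP_append_lt (p : Char → Bool) (xs ys : List Char) (n : Nat)
    (h : n < xs.length) : pvGoP p (xs ++ ys) n = pvGoP p xs n := by
  induction n with
  | zero => simp only [pvGoP]; rw [List.getElem?_append_left (by omega)]
  | succ j ih =>
    simp only [pvGoP]
    rw [List.getElem?_append_left (by omega), ih (by omega)]

-- B's reverse scan computes the countdown search started at the length
theorem pv_scan_eq (s : List Char) : pvScanB s.reverse = pvGoP pvEndB s s.length := by
  induction s using List.reverseRecOn with
  | nil => simp [pvScanB, pvGoP]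
  | append_singleton xs c ih =>
    have hlen : (xs ++ [c]).length = xs.length + 1 := by simp
    have hnone : (xs ++ [c])[xs.length + 1]? = none := by
      apply List.getElem?_eq_none; simp
    have hsome : (xs ++ [c])[xs.length]? = some c := by
      simp
    simp only [List.reverse_append, List.reverse_singleton, List.singleton_append,
      pvScanB, hlen]
    rw [show pvGoP pvEndB (xs ++ [c]) (xs.length + 1)
          = if ((((xs ++ [c])[xs.length + 1]?).map pvEndB).getD false)
            then ((xs.length : Int) + 1) else pvGoP pvEndB (xs ++ [c]) xs.length
        from rfl]
    rw [hnone]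
    simp only [Option.map_none, Option.getD_none, if_false, Bool.false_eq_true]
    by_cases hc : pvEndB c
    · cases hxs : xs.length with
      | zero =>
        have hx : xs = [] := List.eq_nil_of_length_eq_zero hxs
        subst hx
        simp [pvGoP, hc]
      | succ j =>
        rw [show pvGoP pvEndB (xs ++ [c]) (j + 1)
              = if ((((xs ++ [c])[j+1]?).map pvEndB).getD false)
                then ((j : Int) + 1) else pvGoP pvEndB (xs ++ [c]) j from rfl]
        rw [hxs] at hsome
        simp only [hsome, Option.map_some, Option.getD_some, hc, if_true,
          List.length_reverse, hxs]
        simp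
    · rw [Bool.not_eq_true] at hc
      cases hxs : xs.length with
      | zero =>
        have hx : xs = [] := List.eq_nil_of_length_eq_zero hxs
        subst hx
        simp [pvScanB, pvGoP, hc]
      | succ j =>
        rw [show pvGoP pvEndB (xs ++ [c]) (j + 1)
              = if ((((xs ++ [c])[j+1]?).map pvEndB).getD false)
                then ((j : Int) + 1) else pvGoP pvEndB (xs ++ [c]) j from rfl]
        rw [hxs] at hsome
        simp only [hsome, Option.map_some, Option.getD_some, hc, Bool.false_eq_true,
          if_false]
        rw [pvGoP_append_lt pvEndB xs [c] j (by omega)]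
        rw [ih, hxs]
        rw [show pvGoP pvEndB xs (j + 1)
              = if (((xs[j+1]?).map pvEndB).getD false)
                then ((j : Int) + 1) else pvGoP pvEndB xs j from rfl]
        have : xs[j+1]? = none := by apply List.getElem?_eq_none; omega
        simp [this]

-- pyGet? at -1 on a nonempty list is the last element
theorem pv_pyGet_neg_one (s : List Char) (h : s ≠ []) :
    PySem.List.pyGet? s (-1) = some (s.getLast h) := by
  have hl : 1 ≤ s.length := by
    cases s with | nil => simp at h | cons a t => simp
  simp only [PySem.List.pyGet?, PySem.List.pyIdx?]
  rw [if_neg (by omega), if_pos (by omega)]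
  show s[s.length - (- -1 : Int).toNat]? = some (s.getLast h)
  have h1 : ((- -1 : Int)).toNat = 1 := rfl
  rw [h1]
  have hidx : s.length - 1 < s.length := by omega
  rw [List.getElem?_eq_getElem hidx]
  simp [List.getLast_eq_getElem]

theorem pv_union_eq (c : Char) :
    ((fun d => ('.' : Char) == d) c || (fun d => ('!' : Char) == d) c
      || (fun d => ('?' : Char) == d) c) = pvEndB c := by
  simp only [pvEndB]
  rw [@BEq.comm _ _ _ '.' c, @BEq.comm _ _ _ '!' c, @BEq.comm _ _ _ '?' c]

-- ===== VERDICT (by name: the statement is the Claim_ definition above) =====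
theorem complete_paragraph_spec : Claim_equal_complete_paragraph := by
  unfold Claim_equal_complete_paragraph
  intro string _ hpre
  unfold Spec_complete_paragraph
  simp only [complete_paragraph, complete_paragraph_alt]
  unfold Pre_complete_paragraph at hpre
  set s := PySem.Str.strip string with hs
  have htne : s.toList ≠ [] := by
    intro h
    apply hpre
    rw [← String.toList_inj, h]
    rfl
  have hget : PySem.Str.pyGet? s (-1) = some (s.toList.getLast htne) := by
    rw [show PySem.Str.pyGet? s (-1) = PySem.List.pyGet? s.toList (-1) by
      simp [PySem.Str.pyGet?_eq]]
    exact pv_pyGet_neg_one s.toList htne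
  simp only [hget]
  have hscan : pvScanB s.toList.reverse = pvGoP pvEndB s.toList s.toList.length :=
    pv_scan_eq s.toList
  set c := s.toList.getLast htne with hc
  have hlen1 : 0 < s.toList.length := List.length_pos_of_ne_nil htne
  by_cases hend : pvEndB c
  · -- A takes the else branch (ends with punctuation); B's scan hits index len-1
    have hcnd : (!(c == '.' || c == '!' || c == '?')) = false := by
      rw [show (c == '.' || c == '!' || c == '?') = pvEndB c from rfl, hend]; rfl
    rw [hcnd]
    simp only [Bool.false_eq_true, if_false]
    have hrev : s.toList.reverse = c :: s.toList.dropLast.reverse := by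
      conv_lhs => rw [← List.dropLast_concat_getLast htne]
      simp [hc]
    have hi : pvScanB s.toList.reverse = ((s.toList.length - 1 : Nat) : Int) := by
      rw [hrev]
      simp [pvScanB, hend, List.length_dropLast]
    rw [hi]
    rw [if_neg (show ¬(((s.toList.length - 1 : Nat) : Int) < 0) by omega)]
    have hcast : ((s.toList.length - 1 : Nat) : Int) + 1 = ((s.toList.length : Nat) : Int) := by
      omega
    rw [hcast, PySem.List.slice_to_natCast]
    have htake : List.take s.length s.toList = s.toList :=
      List.take_of_length_le (by simp)
    simp [htake]
  · -- A takes the rfind branch; the max of the three rfinds is B's scan result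
    rw [Bool.not_eq_true] at hend
    have hcnd : (!(c == '.' || c == '!' || c == '?')) = true := by
      rw [show (c == '.' || c == '!' || c == '?') = pvEndB c from rfl, hend]; rfl
    rw [hcnd]
    simp only [if_true]
    have hrfind : ∀ (d : Char) (sub : String), sub.toList = [d] →
        PySem.Str.rfind s sub = pvGoP (fun e => d == e) s.toList s.toList.length := by
      intro d sub hsub
      rw [PySem.Str.rfind_eq, hsub, PySem.Chars.rfind, pv_rfind_go_eq]
    rw [hrfind '.' "." rfl, hrfind '!' "!" rfl, hrfind '?' "?" rfl]
    rw [pv_max3, pvGoP_congr _ pvEndB pv_union_eq, ← hscan]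
    set i := pvScanB s.toList.reverse with hi
    have hge : -1 ≤ i := by rw [hscan]; exact pvGoP_ge _ _ _
    by_cases hneg : i = -1
    · rw [if_neg (by simp [hneg]), if_pos (by omega)]
      rw [← String.toList_inj]
      simp
    · rw [if_pos hneg, if_neg (by omega)]
      rw [← String.toList_inj]
      simp
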